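-- pv_equiv track=rewrite | github.com/paradigmdragon/sophia | scripts/sync_forest_loop.py | _bucket_key
-- ===== SOURCE A (Python) =====
-- def _bucket_key(path: str) -> str:
--     lowered = str(path or "").strip().lower()
--     if lowered.startswith("apps/desktop/"):
--         return "ui"
--     if lowered.startswith("docs/") or lowered.startswith("spec/"):
--         return "docs"
--     for prefix in ("api/", "core/", "sophia_kernel/", "scripts/", "kernel/", "tests/"):
--         if lowered.startswith(prefix):
--             return prefix.split("/", 1)[0]
--     top = lowered.split("/", 1)[0].strip()
--     return top or "misc"
-- ===== SOURCE B (Python) =====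
-- def _bucket_key(path: str) -> str:
--     parts = str(path or "").strip().lower().split("/")
--     if len(parts) > 2 and parts[0] == "apps" and parts[1] == "desktop":
--         return "ui"
--     if len(parts) > 1 and parts[0] in ("docs", "spec"):
--         return "docs"
--     top = parts[0].strip()
--     return top or "misc"
-- ===== Notes on version B (the rewrite author's own statement) =====
-- stated objective: simpler
-- what changed: B splits the normalized path on '/' once and decides by positional segments and segment count, removing A's chain of eight startswith scans and the six-prefix loop (each of whose returns equals the first-segment fallback).
import Mathlib
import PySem

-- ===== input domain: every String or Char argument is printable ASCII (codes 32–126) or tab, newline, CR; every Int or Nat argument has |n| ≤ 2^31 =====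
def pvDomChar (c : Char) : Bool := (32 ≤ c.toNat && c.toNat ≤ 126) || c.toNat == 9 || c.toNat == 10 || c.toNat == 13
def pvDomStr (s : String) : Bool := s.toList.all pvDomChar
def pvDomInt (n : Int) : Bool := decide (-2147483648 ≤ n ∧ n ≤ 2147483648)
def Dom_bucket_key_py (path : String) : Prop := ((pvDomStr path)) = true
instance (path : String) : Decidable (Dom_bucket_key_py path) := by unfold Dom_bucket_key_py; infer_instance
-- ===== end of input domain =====

-- B replaces A's chain of eight prefix scans and a six-prefix loop by one split on '/'
-- and positional checks on the segments (objective: simpler).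

-- ===== PORT A =====
-- A's for-loop over the six prefix literals, as structural recursion over that list;
-- for a str argument, Python's `str(path or "")` is `path` itself ("" stays ""), so it is ported as `path`.
def bucketLoopA (lowered : String) : List String → Option String
  | [] => none
  | p :: rest =>
    if PySem.Str.startswith lowered p then
      some (((PySem.Str.splitMax? p "/" 1).getD []).headD "")
    else bucketLoopA lowered rest

def bucket_key_py (path : String) : String :=
  let lowered := PySem.Str.lower (PySem.Str.strip path)
  if PySem.Str.startswith lowered "apps/desktop/" then "ui"
  else if PySem.Str.startswith lowered "docs/" || PySem.Str.startswith lowered "spec/" then "docs"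
  else
    match bucketLoopA lowered ["api/", "core/", "sophia_kernel/", "scripts/", "kernel/", "tests/"] with
    | some r => r
    | none =>
      let top := PySem.Str.strip (((PySem.Str.splitMax? lowered "/" 1).getD []).headD "")
      if top = "" then "misc" else top

-- ===== PORT B =====
def bucket_key_py_alt (path : String) : String :=
  let parts := (PySem.Str.split? (PySem.Str.lower (PySem.Str.strip path)) "/").getD []
  if 2 < parts.length ∧ parts.getD 0 "" = "apps" ∧ parts.getD 1 "" = "desktop" then "ui"
  else if 1 < parts.length ∧ (parts.getD 0 "" = "docs" ∨ parts.getD 0 "" = "spec") then "docs"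
  else
    let top := PySem.Str.strip (parts.getD 0 "")
    if top = "" then "misc" else top

-- ===== PRECONDITION & SPEC =====
def Spec_bucket_key_py (path : String) (out : String) : Prop := out = bucket_key_py_alt path
instance (path : String) (out : String) : Decidable (Spec_bucket_key_py path out) := by unfold Spec_bucket_key_py; infer_instance

-- ===== CLAIM (what is proved, stated in full; the proofs are below) =====
def Claim_equal_bucket_key_py : Prop := ∀ (path : String), Dom_bucket_key_py path → Spec_bucket_key_py path (bucket_key_py path)

-- ===== LEMMAS AND PROOFS =====

-- simple one-character split, the proof-side model of Python's s.split("/")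
def pvSplit : List Char → List (List Char)
  | [] => [[]]
  | a :: rest => if a = '/' then [] :: pvSplit rest else (pvSplit rest).modifyHead (a :: ·)

theorem pvSplit_ne_nil (cs : List Char) : pvSplit cs ≠ [] := by
  induction cs with
  | nil => simp [pvSplit]
  | cons a rest ih =>
    simp only [pvSplit]
    split_ifs
    · simp
    · cases h : pvSplit rest with
      | nil => exact absurd h ih
      | cons x xs => simp

theorem pvGo_eq (fuel : Nat) (l cur : List Char) (acc : List (List Char)) (h : l.length ≤ fuel) :
    PySem.Chars.splitOn.go ['/'] fuel l cur acc = acc.reverse ++ (pvSplit l).modifyHead (cur.reverse ++ ·) := by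
  induction fuel generalizing l cur acc with
  | zero =>
    have hl : l = [] := by cases l <;> simp_all
    subst hl
    simp [PySem.Chars.splitOn.go, pvSplit]
  | succ f ih =>
    cases l with
    | nil => simp [PySem.Chars.splitOn.go, pvSplit]
    | cons a rest =>
      simp only [PySem.Chars.splitOn.go]
      by_cases ha : a = '/'
      · subst ha
        rw [if_pos (by simp [List.isPrefixOf])]
        simp only [List.length_singleton, List.drop_one, List.tail_cons]
        rw [ih rest [] (cur.reverse :: acc) (by simp at h; omega)]
        simp only [pvSplit]
        cases pvSplit rest <;> simp
      · rw [if_neg (by simp [List.isPrefixOf]; intro hh; exact absurd hh.symm ha)]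
        rw [ih rest (a :: cur) acc (by simp at h; omega)]
        obtain ⟨x, xs, hx⟩ : ∃ x xs, pvSplit rest = x :: xs := by
          cases hxx : pvSplit rest with
          | nil => exact absurd hxx (pvSplit_ne_nil rest)
          | cons x xs => exact ⟨x, xs, rfl⟩
        simp [pvSplit, ha, hx]

theorem pvSplitOn_eq (cs : List Char) : PySem.Chars.splitOn cs ['/'] = pvSplit cs := by
  unfold PySem.Chars.splitOn
  rw [pvGo_eq _ _ _ _ (by omega)]
  cases h : pvSplit cs with
  | nil => exact absurd h (pvSplit_ne_nil cs)
  | cons x xs => simp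

theorem pvGoMax0 (fuel : Nat) (l cur : List Char) (acc : List (List Char)) :
    PySem.Chars.splitOnMax.go ['/'] fuel 0 l cur acc = acc.reverse ++ [cur.reverse ++ l] := by
  cases fuel with
  | zero => simp [PySem.Chars.splitOnMax.go]
  | succ f => cases l with
    | nil => simp [PySem.Chars.splitOnMax.go]
    | cons a rest => simp [PySem.Chars.splitOnMax.go]

theorem pvGoMax1 (fuel : Nat) (l cur : List Char) (acc : List (List Char)) (h : l.length ≤ fuel) :
    PySem.Chars.splitOnMax.go ['/'] fuel 1 l cur acc =
      acc.reverse ++ (cur.reverse ++ l.takeWhile (· ≠ '/')) ::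
        (if '/' ∈ l then [(l.dropWhile (· ≠ '/')).tail] else []) := by
  induction fuel generalizing l cur acc with
  | zero =>
    have hl : l = [] := by cases l <;> simp_all
    subst hl
    simp [PySem.Chars.splitOnMax.go]
  | succ f ih =>
    cases l with
    | nil => simp [PySem.Chars.splitOnMax.go]
    | cons a rest =>
      simp only [PySem.Chars.splitOnMax.go]
      rw [if_neg (by omega)]
      by_cases ha : a = '/'
      · subst ha
        rw [if_pos (by simp [List.isPrefixOf])]
        simp only [List.length_singleton, List.drop_one, List.tail_cons]
        rw [pvGoMax0]
        simp [List.takeWhile, List.dropWhile]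
      · rw [if_neg (by simp [List.isPrefixOf]; intro hh; exact absurd hh.symm ha)]
        rw [ih rest (a :: cur) acc (by simp at h; omega)]
        simp only [List.takeWhile_cons, List.dropWhile_cons, List.mem_cons, ha,
          decide_false, Bool.not_false, if_true, decide_not, decide_eq_true_eq, if_neg ha]
        have : ('/' = a ∨ '/' ∈ rest) ↔ '/' ∈ rest := by
          constructor
          · rintro (rfl | hm)
            · exact absurd rfl ha
            · exact hm
          · exact Or.inr
        rw [if_congr this rfl rfl]
        simp

theorem pvSplitOnMax_head (cs : List Char) :
    (PySem.Chars.splitOnMax cs ['/'] 1).headD [] = cs.takeWhile (· ≠ '/') := by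
  unfold PySem.Chars.splitOnMax
  rw [if_neg (by omega)]
  rw [show (1 : Int).toNat = 1 from rfl, pvGoMax1 _ _ _ _ (by omega)]
  simp

theorem pvSplit_headD (cs : List Char) : (pvSplit cs).headD [] = cs.takeWhile (· ≠ '/') := by
  induction cs with
  | nil => simp [pvSplit]
  | cons a rest ih =>
    by_cases ha : a = '/'
    · subst ha; simp [pvSplit, List.takeWhile_cons]
    · simp only [pvSplit, if_neg ha, List.takeWhile_cons, decide_eq_true_eq]
      rw [if_pos ha]
      cases h : pvSplit rest with
      | nil => exact absurd h (pvSplit_ne_nil rest)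
      | cons x xs => simp_all

theorem pvSplit_append (p t : List Char) (hp : '/' ∉ p) : pvSplit (p ++ '/' :: t) = p :: pvSplit t := by
  induction p with
  | nil => simp [pvSplit]
  | cons a p' ih =>
    have ha : a ≠ '/' := fun h => hp (h ▸ List.mem_cons_self)
    simp only [List.cons_append, pvSplit, if_neg ha]
    rw [ih (fun h => hp (List.mem_cons_of_mem _ h))]
    simp

theorem pvSplit_recover (cs : List Char) (h : 2 ≤ (pvSplit cs).length) :
    ∃ t, cs = (pvSplit cs).headD [] ++ '/' :: t ∧ pvSplit t = (pvSplit cs).tail := by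
  induction cs with
  | nil => simp [pvSplit] at h
  | cons a rest ih =>
    by_cases ha : a = '/'
    · subst ha
      exact ⟨rest, by simp [pvSplit], by simp [pvSplit]⟩
    · simp only [pvSplit, if_neg ha] at h ⊢
      obtain ⟨x, xs, hx⟩ : ∃ x xs, pvSplit rest = x :: xs := by
        cases hxx : pvSplit rest with
        | nil => exact absurd hxx (pvSplit_ne_nil rest)
        | cons x xs => exact ⟨x, xs, rfl⟩
      rw [hx] at h ⊢
      simp only [List.modifyHead_cons, List.length_cons, List.headD_cons, List.tail_cons] at h ⊢
      obtain ⟨t, h1, h2⟩ := ih (by rw [hx]; simpa using h)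
      rw [hx] at h1 h2
      simp only [List.headD_cons, List.tail_cons] at h1 h2
      exact ⟨t, by rw [List.cons_append, ← h1], h2⟩

theorem pvStartswith_iff (cs p : List Char) (hp : '/' ∉ p) :
    PySem.Chars.startswith cs (p ++ ['/']) = true ↔
      2 ≤ (pvSplit cs).length ∧ (pvSplit cs).headD [] = p := by
  rw [PySem.Chars.startswith_iff]
  constructor
  · rintro ⟨t, ht⟩
    have hcs : cs = p ++ '/' :: t := by simpa using ht.symm
    rw [hcs, pvSplit_append p t hp]
    refine ⟨?_, by simp⟩
    rcases hpt : pvSplit t with _ | ⟨x, xs⟩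
    · exact absurd hpt (pvSplit_ne_nil t)
    · simp [hpt]
  · rintro ⟨hlen, hhead⟩
    obtain ⟨t, h1, _⟩ := pvSplit_recover cs hlen
    rw [hhead] at h1
    exact ⟨t, by simp [h1]⟩

theorem pvStartswith2_iff (cs p q : List Char) (hp : '/' ∉ p) (hq : '/' ∉ q) :
    PySem.Chars.startswith cs (p ++ '/' :: (q ++ ['/'])) = true ↔
      3 ≤ (pvSplit cs).length ∧ (pvSplit cs).headD [] = p ∧ (pvSplit cs).tail.headD [] = q := by
  rw [PySem.Chars.startswith_iff]
  constructor
  · rintro ⟨t, ht⟩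
    have hcs : cs = p ++ '/' :: (q ++ '/' :: t) := by simpa using ht.symm
    rw [hcs, pvSplit_append p _ hp, pvSplit_append q t hq]
    refine ⟨?_, by simp, by simp⟩
    rcases hpt : pvSplit t with _ | ⟨x, xs⟩
    · exact absurd hpt (pvSplit_ne_nil t)
    · simp [hpt]
  · rintro ⟨hlen, hhead, hsnd⟩
    obtain ⟨t, h1, h2⟩ := pvSplit_recover cs (by omega)
    have hlent : 2 ≤ (pvSplit t).length := by
      rw [h2]
      cases hc : pvSplit cs with
      | nil => exact absurd hc (pvSplit_ne_nil cs)
      | cons x xs => rw [hc] at hlen; simp at hlen ⊢; omega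
    obtain ⟨u, h3, _⟩ := pvSplit_recover t hlent
    have hheadt : (pvSplit t).headD [] = q := by
      rw [h2]
      cases hc : pvSplit cs with
      | nil => exact absurd hc (pvSplit_ne_nil cs)
      | cons x xs => rw [hc] at hsnd; simpa using hsnd
    rw [hheadt] at h3
    rw [hhead] at h1
    exact ⟨u, by simp [h1, h3]⟩

theorem pvHeadD_map (l : List (List Char)) : (l.map String.ofList).headD "" = String.ofList (l.headD []) := by
  cases l <;> rfl

theorem bucketLoopA_nil (l : String) : bucketLoopA l [] = none := rfl

theorem bucketLoopA_cons (l p : String) (rest : List String) :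
    bucketLoopA l (p :: rest) =
      if PySem.Str.startswith l p then
        some (((PySem.Str.splitMax? p "/" 1).getD []).headD "")
      else bucketLoopA l rest := rfl

-- ===== VERDICT (by name: the statement is the Claim_ definition above) =====
theorem bucket_key_py_spec : Claim_equal_bucket_key_py := by
  intro path _
  unfold Spec_bucket_key_py bucket_key_py bucket_key_py_alt
  simp only [PySem.Str.startswith, PySem.Str.split?, PySem.Str.splitMax?, PySem.Str.toList_lower,
    PySem.Str.toList_strip, PySem.Chars.split?, PySem.Chars.splitMax?]
  set cs := PySem.Chars.lower (PySem.Chars.strip path.toList) with hcs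
  obtain ⟨x, xs, hx⟩ : ∃ x xs, pvSplit cs = x :: xs := by
    cases h : pvSplit cs with
    | nil => exact absurd h (pvSplit_ne_nil cs)
    | cons x xs => exact ⟨x, xs, rfl⟩
  have hslash : ("/" : String).toList = ['/'] := by decide
  simp only [hslash, pvSplitOn_eq, hx]
  rw [bucketLoopA_cons, bucketLoopA_cons, bucketLoopA_cons, bucketLoopA_cons, bucketLoopA_cons,
    bucketLoopA_cons, bucketLoopA_nil]
  simp only [PySem.Str.startswith_eq, PySem.Str.toList_lower, PySem.Str.toList_strip, ← hcs]
  simp only [List.isEmpty_cons, Bool.false_eq_true, if_false, Option.map_some, Option.getD_some,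
    List.map_cons, List.length_cons, List.getD_cons_zero, List.getD_cons_succ, pvHeadD_map,
    pvSplitOnMax_head, List.length_map]
  have hone : ∀ (nm : List Char), '/' ∉ nm →
      (PySem.Chars.startswith cs (nm ++ ['/']) = true ↔ 1 ≤ xs.length ∧ x = nm) := by
    intro nm h
    rw [pvStartswith_iff _ _ h, hx]
    simp only [List.length_cons, List.headD_cons]
    constructor <;> rintro ⟨h1, h2⟩ <;> exact ⟨by omega, h2⟩
  have hxtake : List.takeWhile (fun c => decide (c ≠ '/')) cs = x := by
    have h := pvSplit_headD cs
    rw [hx] at h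
    simpa using h.symm
  rw [hxtake]
  have htwo : PySem.Chars.startswith cs "apps/desktop/".toList = true ↔
      2 ≤ xs.length ∧ x = "apps".toList ∧ xs.headD [] = "desktop".toList := by
    rw [show ("apps/desktop/".toList) = ("apps".toList ++ '/' :: ("desktop".toList ++ ['/'])) from
      by decide]
    rw [pvStartswith2_iff _ _ _ (by decide) (by decide), hx]
    simp only [List.length_cons, List.headD_cons, List.tail_cons]
    constructor <;> rintro ⟨g1, g2, g3⟩ <;> exact ⟨by omega, g2, g3⟩
  have hdocs : PySem.Chars.startswith cs "docs/".toList = true ↔ 1 ≤ xs.length ∧ x = "docs".toList := by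
    rw [show "docs/".toList = "docs".toList ++ ['/'] from by decide]; exact hone _ (by decide)
  have hspec : PySem.Chars.startswith cs "spec/".toList = true ↔ 1 ≤ xs.length ∧ x = "spec".toList := by
    rw [show "spec/".toList = "spec".toList ++ ['/'] from by decide]; exact hone _ (by decide)
  have hofl : ∀ (l : List Char) (t : String), String.ofList l = t ↔ l = t.toList := by
    intro l t
    constructor
    · intro h; rw [← h]; simp
    · intro h; rw [h]; simp
  -- B's value in the six-prefix situation, for a known first segment nm
  have hBmisc : ∀ (nm : String), x = nm.toList → nm ≠ "apps" → nm ≠ "docs" → nm ≠ "spec" →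
      PySem.Str.strip nm = nm → nm ≠ "" →
      (if 2 < xs.length + 1 ∧ String.ofList x = "apps" ∧ (List.map String.ofList xs).getD 0 "" = "desktop"
        then "ui"
       else if 1 < xs.length + 1 ∧ (String.ofList x = "docs" ∨ String.ofList x = "spec") then "docs"
       else if PySem.Str.strip (String.ofList x) = "" then "misc"
       else PySem.Str.strip (String.ofList x)) = nm := by
    intro nm hxeq hna hnd hns hstr hne
    subst hxeq
    rw [String.ofList_toList]
    rw [if_neg (by rintro ⟨-, h, -⟩; exact hna h), if_neg (by
      rintro ⟨-, h | h⟩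
      · exact hnd h
      · exact hns h)]
    rw [hstr, if_neg hne]
  by_cases h1 : PySem.Chars.startswith cs "apps/desktop/".toList = true
  · rw [if_pos h1]
    obtain ⟨hl, hx0, hx1⟩ := htwo.mp h1
    obtain ⟨y, ys, rfl⟩ : ∃ y ys, xs = y :: ys := by
      cases xs with
      | nil => simp at hl
      | cons a b => exact ⟨a, b, rfl⟩
    rw [if_pos ⟨by simp only [List.length_cons] at hl ⊢; omega, by rw [hx0, String.ofList_toList],
      by simp only [List.map_cons, List.getD_cons_zero]
         rw [show y = "desktop".toList from by simpa using hx1, String.ofList_toList]⟩]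
  · rw [if_neg h1]
    by_cases h2 : (PySem.Chars.startswith cs "docs/".toList || PySem.Chars.startswith cs "spec/".toList) = true
    · rw [if_pos h2]
      have hB : 1 < xs.length + 1 ∧ (String.ofList x = "docs" ∨ String.ofList x = "spec") := by
        rcases Bool.or_eq_true_iff.mp h2 with hd | hs
        · obtain ⟨hl, hx0⟩ := hdocs.mp hd
          exact ⟨by omega, Or.inl (by rw [hx0, String.ofList_toList])⟩
        · obtain ⟨hl, hx0⟩ := hspec.mp hs
          exact ⟨by omega, Or.inr (by rw [hx0, String.ofList_toList])⟩
      rw [if_neg (by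
        rintro ⟨-, h, -⟩
        rcases hB.2 with h' | h' <;> rw [(hofl _ _).mp h'] at h <;> revert h <;> decide), if_pos hB]
    · rw [if_neg h2]
      by_cases h_api : PySem.Chars.startswith cs "api/".toList = true
      · rw [if_pos h_api]
        obtain ⟨hl, hx0⟩ : 1 ≤ xs.length ∧ x = "api".toList := by
          rw [show "api/".toList = "api".toList ++ ['/'] from by decide] at h_api
          exact (hone _ (by decide)).mp h_api
        show (((PySem.Str.splitMax? "api/" "/" 1).getD []).headD "") = _
        rw [show (((PySem.Str.splitMax? ("api/" : String) "/" 1).getD []).headD "") = ("api" : String) from by decide]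
        exact (hBmisc "api" hx0 (by decide) (by decide) (by decide) (by decide) (by decide)).symm
      rw [if_neg h_api]
      by_cases h_core : PySem.Chars.startswith cs "core/".toList = true
      · rw [if_pos h_core]
        obtain ⟨hl, hx0⟩ : 1 ≤ xs.length ∧ x = "core".toList := by
          rw [show "core/".toList = "core".toList ++ ['/'] from by decide] at h_core
          exact (hone _ (by decide)).mp h_core
        show (((PySem.Str.splitMax? "core/" "/" 1).getD []).headD "") = _
        rw [show (((PySem.Str.splitMax? ("core/" : String) "/" 1).getD []).headD "") = ("core" : String) from by decide]
        exact (hBmisc "core" hx0 (by decide) (by decide) (by decide) (by decide) (by decide)).symm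
      rw [if_neg h_core]
      by_cases h_sophia_kernel : PySem.Chars.startswith cs "sophia_kernel/".toList = true
      · rw [if_pos h_sophia_kernel]
        obtain ⟨hl, hx0⟩ : 1 ≤ xs.length ∧ x = "sophia_kernel".toList := by
          rw [show "sophia_kernel/".toList = "sophia_kernel".toList ++ ['/'] from by decide] at h_sophia_kernel
          exact (hone _ (by decide)).mp h_sophia_kernel
        show (((PySem.Str.splitMax? "sophia_kernel/" "/" 1).getD []).headD "") = _
        rw [show (((PySem.Str.splitMax? ("sophia_kernel/" : String) "/" 1).getD []).headD "") = ("sophia_kernel" : String) from by decide]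
        exact (hBmisc "sophia_kernel" hx0 (by decide) (by decide) (by decide) (by decide) (by decide)).symm
      rw [if_neg h_sophia_kernel]
      by_cases h_scripts : PySem.Chars.startswith cs "scripts/".toList = true
      · rw [if_pos h_scripts]
        obtain ⟨hl, hx0⟩ : 1 ≤ xs.length ∧ x = "scripts".toList := by
          rw [show "scripts/".toList = "scripts".toList ++ ['/'] from by decide] at h_scripts
          exact (hone _ (by decide)).mp h_scripts
        show (((PySem.Str.splitMax? "scripts/" "/" 1).getD []).headD "") = _
        rw [show (((PySem.Str.splitMax? ("scripts/" : String) "/" 1).getD []).headD "") = ("scripts" : String) from by decide]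
        exact (hBmisc "scripts" hx0 (by decide) (by decide) (by decide) (by decide) (by decide)).symm
      rw [if_neg h_scripts]
      by_cases h_kernel : PySem.Chars.startswith cs "kernel/".toList = true
      · rw [if_pos h_kernel]
        obtain ⟨hl, hx0⟩ : 1 ≤ xs.length ∧ x = "kernel".toList := by
          rw [show "kernel/".toList = "kernel".toList ++ ['/'] from by decide] at h_kernel
          exact (hone _ (by decide)).mp h_kernel
        show (((PySem.Str.splitMax? "kernel/" "/" 1).getD []).headD "") = _
        rw [show (((PySem.Str.splitMax? ("kernel/" : String) "/" 1).getD []).headD "") = ("kernel" : String) from by decide]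
        exact (hBmisc "kernel" hx0 (by decide) (by decide) (by decide) (by decide) (by decide)).symm
      rw [if_neg h_kernel]
      by_cases h_tests : PySem.Chars.startswith cs "tests/".toList = true
      · rw [if_pos h_tests]
        obtain ⟨hl, hx0⟩ : 1 ≤ xs.length ∧ x = "tests".toList := by
          rw [show "tests/".toList = "tests".toList ++ ['/'] from by decide] at h_tests
          exact (hone _ (by decide)).mp h_tests
        show (((PySem.Str.splitMax? "tests/" "/" 1).getD []).headD "") = _
        rw [show (((PySem.Str.splitMax? ("tests/" : String) "/" 1).getD []).headD "") = ("tests" : String) from by decide]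
        exact (hBmisc "tests" hx0 (by decide) (by decide) (by decide) (by decide) (by decide)).symm
      rw [if_neg h_tests]
      show (if PySem.Str.strip (String.ofList x) = "" then "misc" else PySem.Str.strip (String.ofList x)) = _
      have hD : ¬ PySem.Chars.startswith cs "docs/".toList = true := by
        intro hh; exact h2 (by rw [hh]; simp)
      have hS : ¬ PySem.Chars.startswith cs "spec/".toList = true := by
        intro hh; exact h2 (by rw [hh]; simp)
      have hc1 : ¬(2 < xs.length + 1 ∧ String.ofList x = "apps" ∧
          (List.map String.ofList xs).getD 0 "" = "desktop") := by
        rintro ⟨hlen, happs, hdesk⟩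
        apply h1
        apply htwo.mpr
        refine ⟨by omega, (hofl _ _).mp happs, ?_⟩
        cases xs with
        | nil => simp at hlen
        | cons y ys =>
          simp only [List.map_cons, List.getD_cons_zero] at hdesk
          simpa using (hofl _ _).mp hdesk
      have hc2 : ¬(1 < xs.length + 1 ∧ (String.ofList x = "docs" ∨ String.ofList x = "spec")) := by
        rintro ⟨hlen, hd | hd⟩
        · exact hD (hdocs.mpr ⟨by omega, (hofl _ _).mp hd⟩)
        · exact hS (hspec.mpr ⟨by omega, (hofl _ _).mp hd⟩)
      rw [if_neg hc1, if_neg hc2]
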